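-- pv_equiv track=rewrite | github.com/Skyelabz210/MYSTIC | lyapunov_calculator.py | time_delay_embedding
-- ===== SOURCE A (Python) =====
-- from typing import List, Tuple, Optional, Dict
--
-- def time_delay_embedding(series: List[int], dim: int, tau: int) -> List[List[int]]:
--     """
--     Reconstruct phase space using time-delay embedding.
--
--     Args:
--         series: Time series data
--         dim: Embedding dimension
--         tau: Time delay
--
--     Returns:
--         List of embedded vectors
--     """
--     n = len(series)
--     max_idx = n - (dim - 1) * tau
--
--     if max_idx <= 0:
--         return []
--
--     embedded = []
--     for i in range(max_idx):
--         vector = [series[i + j * tau] for j in range(dim)]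
--         embedded.append(vector)
--
--     return embedded
-- ===== SOURCE B (Python) =====
-- from typing import List
--
-- def time_delay_embedding(series: List[int], dim: int, tau: int) -> List[List[int]]:
--     """Column-major reconstruction: take dim delayed slices, then transpose."""
--     n = len(series)
--     max_idx = n - (dim - 1) * tau
--     if max_idx <= 0:
--         return []
--     cols = [series[j * tau : j * tau + max_idx] for j in range(dim)]
--     return [list(row) for row in zip(*cols)]
-- ===== Notes on version B (the rewrite author's own statement) =====
-- stated objective: alternative
-- what changed: Replaces the row-by-row nested indexing loop by a column-major construction (dim contiguous slices transposed with zip); Pre_ excludes negative tau with dim>=2 (A raises IndexError there) and non-positive dim with positive max_idx, where A's output of max_idx empty vectors for a nonsensical dimension is accidental and B's empty result (zip of no columns) is equally defensible.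
-- outside the precondition, e.g. on time_delay_embedding([1, 2, 3], 0, 1): A returns [[], [], [], []], B returns []; on time_delay_embedding([1, 2, 3], -1, 0): A returns [[], [], []], B returns []
import Mathlib
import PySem

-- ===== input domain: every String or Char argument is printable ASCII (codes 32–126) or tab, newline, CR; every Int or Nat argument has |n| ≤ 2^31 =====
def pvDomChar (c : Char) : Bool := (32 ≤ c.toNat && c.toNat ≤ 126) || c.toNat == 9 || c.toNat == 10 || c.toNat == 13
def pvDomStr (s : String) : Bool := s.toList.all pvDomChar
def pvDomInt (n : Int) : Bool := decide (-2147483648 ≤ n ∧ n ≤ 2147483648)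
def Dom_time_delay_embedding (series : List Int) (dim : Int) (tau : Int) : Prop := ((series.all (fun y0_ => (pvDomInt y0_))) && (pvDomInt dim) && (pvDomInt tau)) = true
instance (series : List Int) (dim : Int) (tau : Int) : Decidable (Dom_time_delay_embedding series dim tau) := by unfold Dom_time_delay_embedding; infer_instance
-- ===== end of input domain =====

-- B builds the embedding column-major (dim delayed slices, transposed) instead of A's
-- row-by-row nested-index loop; same cost, different decomposition (objective: alternative).

-- ===== PORT A =====
def time_delay_embedding (series : List Int) (dim : Int) (tau : Int) : List (List Int) :=
  let n : Int := series.length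
  let max_idx : Int := n - (dim - 1) * tau
  if max_idx ≤ 0 then []
  else
    (PySem.List.pyRange 0 max_idx 1).foldl
      (fun embedded i =>
        embedded ++ [(PySem.List.pyRange 0 dim 1).map
          (fun j => PySem.List.pyGetD series (i + j * tau) 0)])
      []

-- ===== PORT B =====
-- hand port of Python's zip(*cols): rows of heads until some column (or the column
-- list itself) is exhausted; exact for lists of Int lists.
def pvZipStar : List (List Int) → List (List Int)
  | [] => []
  | c :: rest =>
    if h : ((c :: rest).all (fun l => !l.isEmpty)) = true then
      ((c :: rest).map (fun l => l.headD 0)) :: pvZipStar (c.tail :: rest.map List.tail)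
    else []
termination_by cols => (cols.headD []).length
decreasing_by
  simp only [List.all_cons, Bool.and_eq_true, Bool.not_eq_true', List.isEmpty_eq_false_iff] at h
  simp only [List.headD_cons]
  cases c with
  | nil => exact absurd rfl h.1
  | cons a l => simp

def time_delay_embedding_alt (series : List Int) (dim : Int) (tau : Int) : List (List Int) :=
  let n : Int := series.length
  let max_idx : Int := n - (dim - 1) * tau
  if max_idx ≤ 0 then []
  else
    let cols := (PySem.List.pyRange 0 dim 1).map
      (fun j => PySem.List.slice series (some (j * tau)) (some (j * tau + max_idx)))
    pvZipStar cols

-- ===== PRECONDITION & SPEC =====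
-- Pre_ excludes (a) tau < 0 with dim ≥ 2, where A always raises IndexError
-- (series[i] with i ≥ len(series) is reached), and (b) dim ≤ 0 with max_idx > 0,
-- a nonsensical embedding dimension on which A's value (max_idx empty vectors) and
-- B's value (empty list, the transpose of zero columns) are both accidental.
def Pre_time_delay_embedding (series : List Int) (dim : Int) (tau : Int) : Prop :=
  (0 ≤ tau ∨ dim ≤ 1) ∧ (1 ≤ dim ∨ (series.length : Int) - (dim - 1) * tau ≤ 0)
instance (series : List Int) (dim : Int) (tau : Int) : Decidable (Pre_time_delay_embedding series dim tau) := by unfold Pre_time_delay_embedding; infer_instance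

def pvWitness_time_delay_embedding : List Int × Int × Int := ([1, 2, 3, 4, 5], 2, 1)

def Spec_time_delay_embedding (series : List Int) (dim : Int) (tau : Int) (out : List (List Int)) : Prop := out = time_delay_embedding_alt series dim tau
instance (series : List Int) (dim : Int) (tau : Int) (out : List (List Int)) : Decidable (Spec_time_delay_embedding series dim tau out) := by unfold Spec_time_delay_embedding; infer_instance

-- ===== CLAIM (what is proved, stated in full; the proofs are below) =====
def Claim_equal_time_delay_embedding : Prop := ∀ (series : List Int) (dim : Int) (tau : Int), Dom_time_delay_embedding series dim tau → Pre_time_delay_embedding series dim tau → Spec_time_delay_embedding series dim tau (time_delay_embedding series dim tau)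

-- ===== LEMMAS AND PROOFS =====

-- A, written as a map over the index range
theorem A_as_map (series : List Int) (dim tau : Int)
    (h : ¬ ((series.length : Int) - (dim - 1) * tau ≤ 0)) :
    time_delay_embedding series dim tau =
      (PySem.List.pyRange 0 ((series.length : Int) - (dim - 1) * tau) 1).map
        (fun i => (PySem.List.pyRange 0 dim 1).map
          (fun j => PySem.List.pyGetD series (i + j * tau) 0)) := by
  simp only [time_delay_embedding, h, PySem.List.foldl_append_singleton_eq_map]
  simp

-- zip(*cols) of equal-length nonempty column lists, as a row map
theorem pvZipStar_eq (M : Nat) (cols : List (List Int)) (hne : cols ≠ [])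
    (hlen : ∀ c ∈ cols, c.length = M) :
    pvZipStar cols = (List.range M).map (fun i => cols.map (fun c => c.getD i 0)) := by
  induction M generalizing cols with
  | zero =>
    cases cols with
    | nil => exact absurd rfl hne
    | cons c rest =>
      have hc : c = [] := List.eq_nil_of_length_eq_zero (hlen c (by simp))
      rw [pvZipStar]
      simp [hc]
  | succ M ih =>
    cases cols with
    | nil => exact absurd rfl hne
    | cons c rest =>
      have hcne : ∀ l ∈ c :: rest, l ≠ [] := by
        intro l hl h0
        have := hlen l hl
        simp [h0] at this
      have hall : ((c :: rest).all (fun l => !l.isEmpty)) = true := by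
        simp only [List.all_eq_true, Bool.not_eq_true', List.isEmpty_eq_false_iff]
        exact hcne
      rw [pvZipStar]
      rw [dif_pos hall]
      have htl : (c.tail :: rest.map List.tail) = (c :: rest).map List.tail := by simp
      rw [htl, ih ((c :: rest).map List.tail) (by simp)
        (by
          intro t ht
          simp only [List.mem_map] at ht
          obtain ⟨l, hl, rfl⟩ := ht
          have := hlen l hl
          simp [List.length_tail, this])]
      rw [List.range_succ_eq_map]
      simp only [List.map_cons, List.map_map]
      have hh : ∀ l : List Int, l ∈ c :: rest → l.headD 0 = l.getD 0 0 := by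
        intro l hl
        cases l with
        | nil => exact absurd rfl (hcne _ hl)
        | cons a t => simp
      have ht : ∀ (i : Nat), ∀ l : List Int, l ∈ c :: rest →
          l.tail.getD i 0 = l.getD (i + 1) 0 := by
        intro i l hl
        cases l with
        | nil => exact absurd rfl (hcne _ hl)
        | cons a t => simp
      congr 1
      · rw [hh c (by simp)]
        congr 1
        apply List.map_congr_left
        intro l hl
        exact hh l (by simp [hl])
      · apply List.map_congr_left
        intro i _
        simp only [Function.comp, Nat.succ_eq_add_one]
        rw [ht i c (by simp)]
        congr 1
        apply List.map_congr_left
        intro l hl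
        exact ht i l (by simp [hl])

-- a delayed slice of full length, element by element
theorem slice_getD (series : List Int) (a m : Int) (i : Nat)
    (ha : 0 ≤ a) (hm : 0 < m) (hi : (i : Int) < m)
    (hbound : a + m ≤ (series.length : Int)) :
    (PySem.List.slice series (some a) (some (a + m))).getD i 0 =
      PySem.List.pyGetD series ((i : Int) + a) 0 := by
  rw [PySem.List.slice_toNat series ha (by omega)]
  rw [PySem.List.pyGetD_eq_getElem series (i := (i : Int) + a) 0 (by omega) (by omega)]
  rw [List.getD_eq_getElem _ _ (by simp only [List.length_take, List.length_drop]; omega)]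
  simp only [List.getElem_take, List.getElem_drop]
  congr 1
  omega

-- length of a delayed slice that fits
theorem slice_length (series : List Int) (a m : Int)
    (ha : 0 ≤ a) (hm : 0 ≤ m) (hbound : a + m ≤ (series.length : Int)) :
    (PySem.List.slice series (some a) (some (a + m))).length = m.toNat := by
  rw [PySem.List.slice_toNat series ha (by omega)]
  simp only [List.length_take, List.length_drop]
  omega

theorem main_eq (series : List Int) (dim tau : Int)
    (hpre : Pre_time_delay_embedding series dim tau) :
    time_delay_embedding series dim tau = time_delay_embedding_alt series dim tau := by
  obtain ⟨hpre1, hpre2⟩ := hpre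
  by_cases hneg : (series.length : Int) - (dim - 1) * tau ≤ 0
  · simp only [time_delay_embedding, time_delay_embedding_alt]
    rw [if_pos hneg, if_pos hneg]
  · have hdim : 1 ≤ dim := by tauto
    rw [A_as_map series dim tau hneg]
    simp only [time_delay_embedding_alt]
    rw [if_neg hneg]
    set n : Int := (series.length : Int) with hn
    set max_idx : Int := n - (dim - 1) * tau with hmax
    -- bounds for every column index j < dim
    have hjb : ∀ j : Int, 0 ≤ j → j < dim → 0 ≤ j * tau ∧ j * tau + max_idx ≤ n := by
      intro j hj0 hjd
      rcases hpre1 with htau | hd1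
      · constructor
        · positivity
        · have : j * tau ≤ (dim - 1) * tau := by
            apply mul_le_mul_of_nonneg_right (by omega) htau
          omega
      · have hj : j = 0 := by omega
        have h0 : (dim - 1) * tau = 0 := by
          rw [show dim - 1 = 0 by omega]; ring
        subst hj
        simp only [zero_mul, zero_add]
        omega
    rw [PySem.List.pyRange_one 0 max_idx, PySem.List.pyRange_one 0 dim]
    simp only [zero_add, Int.sub_zero, List.map_map]
    rw [pvZipStar_eq max_idx.toNat]
    · apply List.map_congr_left
      intro i hi
      simp only [List.mem_range] at hi
      simp only [Function.comp, List.map_map]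
      apply List.map_congr_left
      intro j hj
      simp only [List.mem_range] at hj
      have hjd : (j : Int) < dim := by
        have : (j : Int) < (dim.toNat : Int) := by exact_mod_cast hj
        omega
      obtain ⟨hb1, hb2⟩ := hjb (j : Int) (by positivity) hjd
      have hiM : (i : Int) < max_idx := by
        have : (i : Int) < (max_idx.toNat : Int) := by exact_mod_cast hi
        omega
      exact (slice_getD series ((j : Int) * tau) max_idx i hb1 (by omega) hiM
        (by omega)).symm
    · simp only [ne_eq, List.map_eq_nil_iff, List.range_eq_nil]
      omega
    · intro c hc
      simp only [List.mem_map, Function.comp] at hc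
      obtain ⟨j, hj, rfl⟩ := hc
      simp only [List.mem_range] at hj
      have hjd : (j : Int) < dim := by
        have : (j : Int) < (dim.toNat : Int) := by exact_mod_cast hj
        omega
      obtain ⟨hb1, hb2⟩ := hjb (j : Int) (by positivity) hjd
      exact slice_length series ((j : Int) * tau) max_idx hb1 (by omega) (by omega)

-- ===== VERDICT (by name: the statement is the Claim_ definition above) =====
theorem time_delay_embedding_spec : Claim_equal_time_delay_embedding := by
  intro series dim tau _ hpre
  unfold Spec_time_delay_embedding
  exact main_eq series dim tau hpre
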